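-- pv_equiv track=rewrite | github.com/jialin-yu/latent-sequence-paraphrase | src/pipeline.py | remove_bos_eos
-- ===== SOURCE A (Python) =====
-- def remove_bos_eos(idx_list, bos_id, eos_id):
--     clear_idx = []
--     for idx in idx_list:
--         if idx == eos_id:
--             return clear_idx
--         else:
--             if idx == bos_id:
--                 continue
--             else:
--                 clear_idx.append(idx)
--
--     return clear_idx
-- ===== SOURCE B (Python) =====
-- def remove_bos_eos(idx_list, bos_id, eos_id):
--     if eos_id in idx_list:
--         kept = idx_list[:idx_list.index(eos_id)]
--     else:
--         kept = idx_list
--     return [idx for idx in kept if idx != bos_id]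
-- ===== Notes on version B (the rewrite author's own statement) =====
-- stated objective: simpler
-- what changed: Replaces A's single early-returning scan with accumulator by a truncate-at-first-eos slice followed by a filter comprehension that drops bos.
import Mathlib
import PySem

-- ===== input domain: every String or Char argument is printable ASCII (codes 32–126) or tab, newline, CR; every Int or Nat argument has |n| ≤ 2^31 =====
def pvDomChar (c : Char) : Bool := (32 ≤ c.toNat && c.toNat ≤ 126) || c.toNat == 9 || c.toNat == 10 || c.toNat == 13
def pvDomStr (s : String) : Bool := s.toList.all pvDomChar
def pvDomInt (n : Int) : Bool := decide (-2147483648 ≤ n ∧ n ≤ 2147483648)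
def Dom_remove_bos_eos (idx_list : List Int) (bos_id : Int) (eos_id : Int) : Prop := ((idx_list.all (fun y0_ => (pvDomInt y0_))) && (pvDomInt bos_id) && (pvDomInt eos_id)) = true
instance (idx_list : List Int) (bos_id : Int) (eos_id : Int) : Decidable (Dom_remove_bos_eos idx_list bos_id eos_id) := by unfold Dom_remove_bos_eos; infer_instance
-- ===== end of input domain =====

-- B replaces A's single early-returning accumulator scan with truncate-at-first-eos then filter-out-bos (objective: simpler).
-- ===== PORT A =====
-- A: one scan with an accumulator, returning early at the first eos, skipping bos
def remove_bos_eos_loop (bos_id : Int) (eos_id : Int) : List Int → List Int → List Int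
  | clear_idx, [] => clear_idx
  | clear_idx, idx :: rest =>
      if idx = eos_id then clear_idx
      else if idx = bos_id then remove_bos_eos_loop bos_id eos_id clear_idx rest
      else remove_bos_eos_loop bos_id eos_id (clear_idx ++ [idx]) rest

def remove_bos_eos (idx_list : List Int) (bos_id : Int) (eos_id : Int) : List Int :=
  remove_bos_eos_loop bos_id eos_id [] idx_list

-- ===== PORT B =====
-- B: truncate at the first eos occurrence (index + slice), then filter out bos
def remove_bos_eos_alt (idx_list : List Int) (bos_id : Int) (eos_id : Int) : List Int :=
  let kept := match PySem.List.index? idx_list eos_id with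
    | some i => PySem.List.slice idx_list none (some (i : Int))
    | none => idx_list
  kept.filter (· ≠ bos_id)

-- ===== PRECONDITION & SPEC =====
def Spec_remove_bos_eos (idx_list : List Int) (bos_id : Int) (eos_id : Int) (out : List Int) : Prop := out = remove_bos_eos_alt idx_list bos_id eos_id
instance (idx_list : List Int) (bos_id : Int) (eos_id : Int) (out : List Int) : Decidable (Spec_remove_bos_eos idx_list bos_id eos_id out) := by unfold Spec_remove_bos_eos; infer_instance

-- ===== CLAIM (what is proved, stated in full; the proofs are below) =====
def Claim_equal_remove_bos_eos : Prop := ∀ (idx_list : List Int) (bos_id : Int) (eos_id : Int), Dom_remove_bos_eos idx_list bos_id eos_id → Spec_remove_bos_eos idx_list bos_id eos_id (remove_bos_eos idx_list bos_id eos_id)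

-- ===== LEMMAS AND PROOFS =====

-- B's value on a cons whose head is not eos: the head survives iff it is not bos
theorem alt_cons_of_ne (x : Int) (rest : List Int) (bos_id eos_id : Int) (hx : x ≠ eos_id) :
    remove_bos_eos_alt (x :: rest) bos_id eos_id =
      (if x = bos_id then [] else [x]) ++ remove_bos_eos_alt rest bos_id eos_id := by
  unfold remove_bos_eos_alt
  rw [PySem.List.index?_cons_of_ne rest hx]
  cases h : PySem.List.index? rest eos_id with
  | none =>
      simp only [Option.map_none]
      by_cases hb : x = bos_id <;> simp [List.filter, hb]
  | some i =>
      simp only [Option.map_some]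
      rw [PySem.List.slice_to_natCast, PySem.List.slice_to_natCast]
      simp only [List.take_succ_cons]
      by_cases hb : x = bos_id <;> simp [List.filter, hb]

-- B's value on a cons whose head is eos: empty
theorem alt_cons_eos (rest : List Int) (bos_id eos_id : Int) :
    remove_bos_eos_alt (eos_id :: rest) bos_id eos_id = [] := by
  unfold remove_bos_eos_alt
  rw [PySem.List.index?_cons_self]
  simp [PySem.List.slice]

-- A's loop accumulates exactly B's value after the accumulator
theorem loop_eq_alt (l : List Int) (bos_id eos_id : Int) : ∀ acc : List Int,
    remove_bos_eos_loop bos_id eos_id acc l = acc ++ remove_bos_eos_alt l bos_id eos_id := by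
  induction l with
  | nil => intro acc; simp [remove_bos_eos_loop, remove_bos_eos_alt, PySem.List.index?]
  | cons x rest ih =>
      intro acc
      by_cases he : x = eos_id
      · subst he
        simp [remove_bos_eos_loop, alt_cons_eos]
      · rw [alt_cons_of_ne x rest bos_id eos_id he]
        rw [remove_bos_eos_loop, if_neg he]
        by_cases hb : x = bos_id
        · rw [if_pos hb, ih]
          simp [hb]
        · rw [if_neg hb, ih]
          simp [hb]

-- ===== VERDICT (by name: the statement is the Claim_ definition above) =====
theorem remove_bos_eos_spec : Claim_equal_remove_bos_eos := by
  intro idx_list bos_id eos_id _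
  unfold Spec_remove_bos_eos remove_bos_eos
  simpa using loop_eq_alt idx_list bos_id eos_id []
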